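-- pv_equiv track=rewrite | github.com/omarkhaled-auto/agent-team-v18 | src/agent_team_v15/contract_generator.py | _group_events_by_publisher
-- ===== SOURCE A (Python) =====
-- from typing import Any
--
-- def _group_events_by_publisher(
--     events: list[dict[str, Any]],
-- ) -> dict[str, list[dict[str, Any]]]:
--     """Group events by their publisher service (inferred from event name prefix)."""
--     groups: dict[str, list[dict[str, Any]]] = {}
--     for ev in events:
--         name = ev.get("name", "")
--         publisher = ev.get("publisher", "")
--         if not publisher and "." in name:
--             publisher = name.split(".")[0]
--         groups.setdefault(publisher or "unknown", []).append(ev)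
--     return groups
-- ===== SOURCE B (Python) =====
-- def _group_events_by_publisher(events):
--     """Two-pass grouping: compute each event's key once conceptually via key(),
--     collect distinct keys in first-occurrence order, then build each group by
--     filtering the event list per key."""
--     def key(ev):
--         name = ev.get("name", "")
--         publisher = ev.get("publisher", "")
--         if not publisher and "." in name:
--             publisher = name.split(".")[0]
--         return publisher or "unknown"
--
--     seen = []
--     for ev in events:
--         k = key(ev)
--         if k not in seen:
--             seen.append(k)
--     return {k: [ev for ev in events if key(ev) == k] for k in seen}
-- ===== Notes on version B (the rewrite author's own statement) =====
-- stated objective: alternative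
-- what changed: A builds the dict in one pass with setdefault().append(); B first collects the distinct publisher keys in first-occurrence order and then builds each group by filtering the event list per key.
import Mathlib
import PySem

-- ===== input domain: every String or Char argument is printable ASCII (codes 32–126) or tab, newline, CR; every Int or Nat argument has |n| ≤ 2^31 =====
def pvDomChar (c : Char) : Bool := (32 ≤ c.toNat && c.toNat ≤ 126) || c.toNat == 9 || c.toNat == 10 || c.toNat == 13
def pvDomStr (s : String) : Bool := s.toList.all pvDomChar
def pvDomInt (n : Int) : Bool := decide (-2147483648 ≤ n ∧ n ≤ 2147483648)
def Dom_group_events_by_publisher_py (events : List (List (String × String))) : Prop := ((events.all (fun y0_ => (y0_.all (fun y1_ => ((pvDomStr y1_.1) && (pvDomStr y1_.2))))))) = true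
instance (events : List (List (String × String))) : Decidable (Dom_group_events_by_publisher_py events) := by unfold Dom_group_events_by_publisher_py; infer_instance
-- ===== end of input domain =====

-- B replaces A's single-pass dict-with-setdefault build by a two-pass decomposition
-- (distinct keys in first-occurrence order, then one filter per key); objective: alternative, not faster.

-- ===== PORT A =====
-- 'groups.setdefault(k, []).append(ev)' is ported as its exact net effect on the dict:
-- groups[k] = groups.get(k, []) + [ev], i.e. Dict.modify k [] (· ++ [ev]).
def group_events_by_publisher_py (events : List (List (String × String))) : List (String × List (List (String × String))) :=
  (events.foldl (fun groups ev =>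
      let name := (PySem.Dict.mk ev).getD "name" ""
      let publisher := (PySem.Dict.mk ev).getD "publisher" ""
      let publisher := if publisher == "" && PySem.Str.isIn "." name
        then ((PySem.Str.split? name ".").getD []).headD ""   -- name.split(".")[0]; split with a nonempty sep never returns an empty list
        else publisher
      groups.modify (if publisher == "" then "unknown" else publisher) [] (· ++ [ev]))
    PySem.Dict.empty).items

-- ===== PORT B =====
-- Source B's key(ev)
def groupKey (ev : List (String × String)) : String :=
  let name := (PySem.Dict.mk ev).getD "name" ""
  let publisher := (PySem.Dict.mk ev).getD "publisher" ""
  let publisher := if publisher == "" && PySem.Str.isIn "." name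
    then ((PySem.Str.split? name ".").getD []).headD ""   -- name.split(".")[0]; split with a nonempty sep never returns an empty list
    else publisher
  if publisher == "" then "unknown" else publisher

def group_events_by_publisher_py_alt (events : List (List (String × String))) : List (String × List (List (String × String))) :=
  let seen := events.foldl (fun seen ev =>
      let k := groupKey ev
      if seen.contains k then seen else seen ++ [k]) []
  seen.map (fun k => (k, events.filter (fun ev => groupKey ev == k)))

-- ===== PRECONDITION & SPEC =====
def Spec_group_events_by_publisher_py (events : List (List (String × String))) (out : List (String × List (List (String × String)))) : Prop := out = group_events_by_publisher_py_alt events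
instance (events : List (List (String × String))) (out : List (String × List (List (String × String)))) : Decidable (Spec_group_events_by_publisher_py events out) := by unfold Spec_group_events_by_publisher_py; infer_instance

-- ===== CLAIM (what is proved, stated in full; the proofs are below) =====
def Claim_equal_group_events_by_publisher_py : Prop := ∀ (events : List (List (String × String))), Dom_group_events_by_publisher_py events → Spec_group_events_by_publisher_py events (group_events_by_publisher_py events)

-- ===== LEMMAS AND PROOFS =====

-- A's loop, with the per-event key computation recognised as groupKey.
lemma groupA_eq_foldl (events : List (List (String × String))) :
    group_events_by_publisher_py events =
      (events.foldl (fun g ev => g.modify (groupKey ev) [] (· ++ [ev])) PySem.Dict.empty).items := rfl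

-- B's first pass is exactly Set.ofList of the keys.
lemma seen_eq_ofList (events : List (List (String × String))) :
    events.foldl (fun seen ev =>
        let k := groupKey ev
        if seen.contains k then seen else seen ++ [k]) [] =
      PySem.Set.ofList (events.map groupKey) := by
  rw [PySem.Set.ofList_eq_foldl, List.foldl_map]
  rfl

lemma main_eq (events : List (List (String × String))) :
    group_events_by_publisher_py events = group_events_by_publisher_py_alt events := by
  rw [groupA_eq_foldl]
  unfold group_events_by_publisher_py_alt
  rw [seen_eq_ofList]
  have hmap : events.foldl (fun g ev => g.modify (groupKey ev) [] (· ++ [ev])) PySem.Dict.empty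
      = (events.map (fun ev => (groupKey ev, ev))).foldl
          (fun g p => g.modify p.1 [] (· ++ [p.2])) PySem.Dict.empty := by
    rw [List.foldl_map]
  have hnd : (events.foldl (fun g ev => g.modify (groupKey ev) [] (· ++ [ev])) PySem.Dict.empty).keys.Nodup := by
    exact PySem.Dict.nodup_keys_foldl_modify_key events groupKey [] (fun g ev => (· ++ [ev])) PySem.Dict.empty (by simp)
  have hkeys : (events.foldl (fun g ev => g.modify (groupKey ev) [] (· ++ [ev])) PySem.Dict.empty).keys
      = PySem.Set.ofList (events.map groupKey) := by
    rw [PySem.Dict.keys_foldl_modify_key]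
    simp [PySem.Set.update, PySem.Set.ofList_eq_foldl, PySem.Dict.keys_empty]
  have hgetD : ∀ k, (events.foldl (fun g ev => g.modify (groupKey ev) [] (· ++ [ev])) PySem.Dict.empty).getD k []
      = events.filter (fun ev => groupKey ev == k) := by
    intro k
    rw [hmap, PySem.Dict.getD_foldl_modify_append]
    simp [List.filter_map, List.map_map, Function.comp_def]
  rw [PySem.Dict.items_eq_map_keys _ hnd []]
  rw [hkeys]
  exact List.map_congr_left (fun k _ => by rw [hgetD])

-- ===== VERDICT (by name: the statement is the Claim_ definition above) =====
theorem group_events_by_publisher_py_spec : Claim_equal_group_events_by_publisher_py := by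
  intro events _
  unfold Spec_group_events_by_publisher_py
  exact main_eq events
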